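-- pv_equiv track=rewrite | github.com/conda/conda | conda/install.py | duplicates_to_remove
-- ===== SOURCE A (Python) =====
-- def dist2pair(dist):
--     dist = str(dist)
--     if dist.endswith(']'):
--         dist = dist.split('[', 1)[0]
--     if dist.endswith('.tar.bz2'):
--         dist = dist[:-8]
--     parts = dist.split('::', 1)
--     return 'defaults' if len(parts) < 2 else parts[0], parts[-1]
--
-- def dist2quad(dist):
--     channel, dist = dist2pair(dist)
--     parts = dist.rsplit('-', 2) + ['', '']
--     return (parts[0], parts[1], parts[2], channel)
--
-- def dist2name(dist):
--     return dist2quad(dist)[0]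
--
-- def name_dist(dist):
--     return dist2name(dist)
--
-- def duplicates_to_remove(dist_metas, keep_dists):
--     """
--     Returns the (sorted) list of distributions to be removed, such that
--     only one distribution (for each name) remains.  `keep_dists` is an
--     iterable of distributions (which are not allowed to be removed).
--     """
--     from collections import defaultdict
--
--     keep_dists = set(keep_dists)
--     ldists = defaultdict(set)  # map names to set of distributions
--     for dist in dist_metas:
--         name = name_dist(dist)
--         ldists[name].add(dist)
--
--     res = set()
--     for dists in ldists.values():
--         # `dists` is the group of packages with the same name
--         if len(dists) == 1:
--             # if there is only one package, nothing has to be removed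
--             continue
--         if dists & keep_dists:
--             # if the group has packages which are have to be kept, we just
--             # take the set of packages which are in group but not in the
--             # ones which have to be kept
--             res.update(dists - keep_dists)
--         else:
--             # otherwise, we take lowest (n-1) (sorted) packages
--             res.update(sorted(dists)[:-1])
--     return sorted(res)
-- ===== SOURCE B (Python) =====
-- def dist2pair(dist):
--     dist = str(dist)
--     if dist.endswith(']'):
--         dist = dist.split('[', 1)[0]
--     if dist.endswith('.tar.bz2'):
--         dist = dist[:-8]
--     parts = dist.split('::', 1)
--     return 'defaults' if len(parts) < 2 else parts[0], parts[-1]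
--
-- def dist2quad(dist):
--     channel, dist = dist2pair(dist)
--     parts = dist.rsplit('-', 2) + ['', '']
--     return (parts[0], parts[1], parts[2], channel)
--
-- def dist2name(dist):
--     return dist2quad(dist)[0]
--
-- def name_dist(dist):
--     return dist2name(dist)
--
-- def duplicates_to_remove(dist_metas, keep_dists):
--     # per-distribution removal predicate over the deduplicated list; no grouping dict
--     keep = set(keep_dists)
--     order = list(dict.fromkeys(dist_metas))
--     def removed(d):
--         group = [e for e in order if name_dist(e) == name_dist(d)]
--         if any(e in keep for e in group):
--             return d not in keep
--         return len(group) > 1 and d != max(group)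
--     return sorted(d for d in order if removed(d))
-- ===== Notes on version B (the rewrite author's own statement) =====
-- stated objective: simpler
-- what changed: Replaces the name-grouping defaultdict-of-sets and per-group set arithmetic (union of dists-keep or sorted(group)[:-1]) by a single per-distribution removal predicate evaluated over the deduplicated input list; the grouping dict, the set differences/unions and the per-group sort all disappear.
import Mathlib
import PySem

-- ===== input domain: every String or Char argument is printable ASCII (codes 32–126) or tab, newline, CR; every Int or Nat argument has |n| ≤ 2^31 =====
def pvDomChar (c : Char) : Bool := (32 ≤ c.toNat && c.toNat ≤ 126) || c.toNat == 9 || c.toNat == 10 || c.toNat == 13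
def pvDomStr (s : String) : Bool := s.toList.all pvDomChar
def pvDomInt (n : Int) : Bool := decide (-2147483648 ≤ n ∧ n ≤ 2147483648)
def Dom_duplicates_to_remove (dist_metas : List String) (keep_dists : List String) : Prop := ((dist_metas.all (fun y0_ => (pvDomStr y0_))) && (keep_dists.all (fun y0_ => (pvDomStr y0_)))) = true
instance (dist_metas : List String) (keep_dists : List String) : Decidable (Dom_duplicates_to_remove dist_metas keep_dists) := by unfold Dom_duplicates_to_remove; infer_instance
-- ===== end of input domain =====

-- B replaces A's defaultdict-of-sets grouping and per-group set arithmetic by a per-distribution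
-- removal predicate over the deduplicated input list (objective: simpler; not faster).

-- ===== PORT A =====
-- hand port of s.rsplit('-', 2): split at the LAST up to 2 '-' occurrences; exact because the
-- separator is a single character, so reversing the string commutes with splitting.
def pyRsplitDash2 (s : String) : List String :=
  ((PySem.Chars.splitOnMax s.toList.reverse ['-'] 2).map (fun cs => String.ofList cs.reverse)).reverse

def dist2pair (dist : String) : String × String :=
  -- str(dist) is the identity on a str argument
  let dist := if PySem.Str.endswith dist "]" then ((PySem.Str.splitMax? dist "[" 1).getD []).headD "" else dist
  -- split always returns a nonempty list, so parts[0] is headD and parts[-1] is getLastD (defaults unreachable)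
  let dist := if PySem.Str.endswith dist ".tar.bz2" then PySem.Str.slice dist none (some (-8)) else dist
  let parts := (PySem.Str.splitMax? dist "::" 1).getD []
  (if parts.length < 2 then "defaults" else parts.headD "", parts.getLastD "")

def dist2quad (dist : String) : String × String × String × String :=
  let cd := dist2pair dist
  let parts := pyRsplitDash2 cd.2 ++ ["", ""]
  -- parts has ≥ 3 elements, so parts[0],parts[1],parts[2] never fail (defaults unreachable)
  (parts.headD "", ((PySem.List.pyGet? parts 1).getD ""), ((PySem.List.pyGet? parts 2).getD ""), cd.1)

def dist2name (dist : String) : String := (dist2quad dist).1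

def name_dist (dist : String) : String := dist2name dist

def duplicates_to_remove (dist_metas : List String) (keep_dists : List String) : List String :=
  let keep : PySem.Set String := PySem.Set.ofList keep_dists
  let ldists : PySem.Dict String (PySem.Set String) :=
    dist_metas.foldl (fun d dist => d.modify (name_dist dist) PySem.Set.empty (fun s => PySem.Set.add s dist)) PySem.Dict.empty
  let res : PySem.Set String :=
    (PySem.Dict.values ldists).foldl (fun res dists =>
      if PySem.Set.len dists == 1 then res
      else if !(PySem.Set.inter dists keep).isEmpty then PySem.Set.update res (PySem.Set.diff dists keep)
      else PySem.Set.update res (PySem.List.slice (PySem.List.sorted dists (fun x => x) false) none (some (-1)))) PySem.Set.empty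
  PySem.List.sorted res (fun x => x) false

-- ===== PORT B =====
def duplicates_to_remove_alt (dist_metas : List String) (keep_dists : List String) : List String :=
  let keep : PySem.Set String := PySem.Set.ofList keep_dists
  let order := PySem.List.dedup dist_metas
  let removed := fun (d : String) =>
    let group := order.filter (fun e => name_dist e == name_dist d)
    if group.any (fun e => PySem.Set.contains keep e) then !(PySem.Set.contains keep d)
    -- max(group) never fails since d ∈ group; the getD default is unreachable
    else decide (1 < group.length) && !(((PySem.List.max? group (fun x => x)).getD "") == d)
  PySem.List.sorted (order.filter removed) (fun x => x) false

-- ===== PRECONDITION & SPEC =====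
def Spec_duplicates_to_remove (dist_metas : List String) (keep_dists : List String) (out : List String) : Prop := out = duplicates_to_remove_alt dist_metas keep_dists
instance (dist_metas : List String) (keep_dists : List String) (out : List String) : Decidable (Spec_duplicates_to_remove dist_metas keep_dists out) := by unfold Spec_duplicates_to_remove; infer_instance

-- ===== CLAIM (what is proved, stated in full; the proofs are below) =====
def Claim_equal_duplicates_to_remove : Prop := ∀ (dist_metas : List String) (keep_dists : List String), Dom_duplicates_to_remove dist_metas keep_dists → Spec_duplicates_to_remove dist_metas keep_dists (duplicates_to_remove dist_metas keep_dists)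

-- ===== LEMMAS AND PROOFS =====

-- the per-group contribution A adds to `res` for a group `g`
def pvContrib (K : PySem.Set String) (g : PySem.Set String) : List String :=
  if PySem.Set.len g == 1 then []
  else if !(PySem.Set.inter g K).isEmpty then PySem.Set.diff g K
  else PySem.List.slice (PySem.List.sorted g (fun x => x) false) none (some (-1))

-- B's removal predicate on a group
def pvRemoved (K : PySem.Set String) (g : List String) (x : String) : Bool :=
  if g.any (fun e => PySem.Set.contains K e) then !(PySem.Set.contains K x)
  else decide (1 < g.length) && !(((PySem.List.max? g (fun y => y)).getD "") == x)

-- A's grouping dict lookup: the group for name n is set(l filtered to name n)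
theorem pv_groupDict_getD (nd : String → String) (l : List String) (d : PySem.Dict String (PySem.Set String)) (n : String) :
    (l.foldl (fun d dist => d.modify (nd dist) PySem.Set.empty (fun s => PySem.Set.add s dist)) d).getD n PySem.Set.empty
    = PySem.Set.update (d.getD n PySem.Set.empty) (l.filter (fun x => nd x == n)) := by
  induction l generalizing d with
  | nil => simp
  | cons x t ih =>
    simp only [List.foldl_cons, List.filter_cons]
    rw [ih]
    rcases eq_or_ne (nd x) n with he | hne
    · rw [he]
      simp only [beq_self_eq_true, if_pos]
      rw [PySem.Set.update_cons, PySem.Dict.getD_modify]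
      simp
    · have hb : (nd x == n) = false := by simp [hne]
      rw [hb]
      simp only [Bool.false_eq_true, if_false]
      rw [PySem.Dict.getD_modify]
      rw [if_neg (fun h => hne h.symm)]

-- membership in A's accumulation loop
theorem pv_mem_foldl_update (c : PySem.Set String → List String) (gs : List (PySem.Set String))
    (s : PySem.Set String) (y : String) :
    (y ∈ gs.foldl (fun r g => PySem.Set.update r (c g)) s) ↔ (y ∈ s ∨ ∃ g ∈ gs, y ∈ c g) := by
  induction gs generalizing s with
  | nil => simp
  | cons g t ih =>
    simp only [List.foldl_cons, ih, PySem.Set.mem_update, List.mem_cons]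
    constructor
    · rintro ((h | h) | ⟨g', hg', h⟩)
      · exact Or.inl h
      · exact Or.inr ⟨g, Or.inl rfl, h⟩
      · exact Or.inr ⟨g', Or.inr hg', h⟩
    · rintro (h | ⟨g', (rfl | hg'), h⟩)
      · exact Or.inl (Or.inl h)
      · exact Or.inl (Or.inr h)
      · exact Or.inr ⟨g', hg', h⟩

theorem pv_nodup_foldl_update (c : PySem.Set String → List String) (gs : List (PySem.Set String))
    (s : PySem.Set String) (hs : s.Nodup) :
    (gs.foldl (fun r g => PySem.Set.update r (c g)) s).Nodup := by
  induction gs generalizing s with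
  | nil => exact hs
  | cons g t ih => exact ih _ (PySem.Set.nodup_update s (c g) hs)

-- set(filter) = filter(set)
theorem pv_ofList_filter (p : String → Bool) (l : List String) :
    PySem.Set.ofList (l.filter p) = (PySem.Set.ofList l).filter p := by
  induction l using List.reverseRecOn with
  | nil => rfl
  | append_singleton l x ih =>
    by_cases hp : p x
    · have hfx : (l ++ [x]).filter p = l.filter p ++ [x] := by simp [hp]
      rw [hfx, PySem.Set.ofList_append_singleton, PySem.Set.ofList_append_singleton, ih]
      by_cases hm : x ∈ l
      · have hm' : x ∈ PySem.Set.ofList l := (PySem.Set.mem_ofList l x).2 hm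
        have hxf : x ∈ List.filter p (PySem.Set.ofList l) := List.mem_filter.2 ⟨hm', hp⟩
        rw [PySem.Set.add_of_mem hxf, PySem.Set.add_of_mem hm']
      · have hm' : x ∉ PySem.Set.ofList l := fun h => hm ((PySem.Set.mem_ofList l x).1 h)
        have hxf : x ∉ List.filter p (PySem.Set.ofList l) := fun h => hm' (List.mem_filter.1 h).1
        rw [PySem.Set.add_of_not_mem hxf, PySem.Set.add_of_not_mem hm', List.filter_append]
        simp [hp]
    · have hfx : (l ++ [x]).filter p = l.filter p := by simp [hp]
      rw [hfx, ih, PySem.Set.ofList_append_singleton, PySem.Set.add_eq_ite]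
      split_ifs with hm
      · rfl
      · rw [List.filter_append]
        simp [hp]

-- last-element characterisation of dropLast of the sorted group
theorem pv_mem_dropLast_sorted (g : List String) (hg : g.Nodup) (x : String) (hx : x ∈ g) :
    (x ∈ (PySem.List.sorted g (fun y => y) false).dropLast)
    ↔ ¬ (((PySem.List.max? g (fun y => y)).getD "") = x) := by
  have hperm : (PySem.List.sorted g (fun y => y) false).Perm g := PySem.List.sorted_perm g (fun y => y) false
  set s := PySem.List.sorted g (fun y => y) false with hsdef
  have hnd : s.Nodup := (hperm.nodup_iff).2 hg
  have hgne : g ≠ [] := List.ne_nil_of_mem hx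
  have hne : s ≠ [] := by
    intro h
    rw [h] at hperm
    exact hgne (List.Perm.eq_nil hperm.symm)
  have hxs : x ∈ s := hperm.mem_iff.2 hx
  obtain ⟨m, hm⟩ : ∃ m, PySem.List.max? g (fun y => y) = some m := by
    cases hmm : PySem.List.max? g (fun y => y) with
    | none => exact absurd ((PySem.List.max?_eq_none_iff g (fun y => y)).1 hmm) hgne
    | some m => exact ⟨m, rfl⟩
  have hmmem : m ∈ g := PySem.List.max?_mem hm
  have hmax : ∀ y ∈ g, y ≤ m := PySem.List.max?_isMax hm
  have hsplit : s.dropLast ++ [s.getLast hne] = s := List.dropLast_append_getLast hne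
  have hpw : s.Pairwise (fun a b => a ≤ b) := by
    have h := PySem.List.sorted_pairwise g (fun y => y)
    simpa using h
  have hlastle : ∀ a ∈ s.dropLast, a ≤ s.getLast hne := by
    rw [← hsplit] at hpw
    intro a ha
    exact (List.pairwise_append.1 hpw).2.2 a ha _ (List.mem_singleton_self _)
  have hlast_mem : s.getLast hne ∈ g := hperm.mem_iff.1 (List.getLast_mem hne)
  have hmlast : m = s.getLast hne := by
    have hm_in_s : m ∈ s := hperm.mem_iff.2 hmmem
    rw [← hsplit] at hm_in_s
    rcases List.mem_append.1 hm_in_s with h | h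
    · exact le_antisymm (hlastle m h) (hmax _ hlast_mem)
    · exact List.mem_singleton.1 h
  have hdisj : ∀ a ∈ s.dropLast, a ≠ s.getLast hne := by
    have h := hnd
    rw [← hsplit] at h
    intro a ha hEq
    exact (List.nodup_append.1 h).2.2 a ha (s.getLast hne) (List.mem_singleton_self _) hEq
  rw [hm]
  simp only [Option.getD_some]
  constructor
  · intro hxd hEq
    exact hdisj x hxd (hEq.symm.trans hmlast)
  · intro hneq
    rw [← hsplit] at hxs
    rcases List.mem_append.1 hxs with h | h
    · exact h
    · exact absurd (hmlast.trans (List.mem_singleton.1 h).symm) hneq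

-- the crux: A's contribution membership = B's removal predicate, on any nodup group containing x
theorem pv_pergroup (K : PySem.Set String) (g : PySem.Set String) (x : String)
    (hg : g.Nodup) (hx : x ∈ g) :
    (x ∈ pvContrib K g) ↔ pvRemoved K g x = true := by
  have hciff : ∀ y, (PySem.Set.contains K y = true) ↔ y ∈ K := fun y => PySem.Set.contains_iff K y
  unfold pvContrib pvRemoved
  by_cases hany : g.any (fun e => PySem.Set.contains K e) = true
  · obtain ⟨e, he, hek⟩ := List.any_eq_true.1 hany
    have heK : e ∈ K := (hciff e).1 hek
    have hinter : (PySem.Set.inter g K).isEmpty = false := by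
      rcases h : (PySem.Set.inter g K).isEmpty with _ | _
      · rfl
      · exfalso
        have h2 : e ∈ PySem.Set.inter g K := (PySem.Set.mem_inter g K e).2 ⟨he, heK⟩
        rw [List.isEmpty_iff.1 h] at h2
        exact List.not_mem_nil h2
    rw [hany, if_pos rfl]
    by_cases h1 : (PySem.Set.len g == 1) = true
    · have hlen : g.length = 1 := by
        have h2 := beq_iff_eq.1 h1
        simp only [PySem.Set.len] at h2
        exact_mod_cast h2
      obtain ⟨a, ha⟩ := List.length_eq_one_iff.1 hlen
      subst ha
      have hxa : x = a := List.mem_singleton.1 hx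
      have hea : e = a := List.mem_singleton.1 he
      rw [if_pos h1]
      simp only [List.not_mem_nil, false_iff]
      subst hxa
      subst hea
      simp [heK]
    · rw [if_neg h1, hinter]
      rw [if_pos (show (!false) = true from rfl)]
      rw [PySem.Set.mem_diff g K x]
      by_cases hxK : x ∈ K
      · simp [hxK]
      · have hc : PySem.Set.contains K x = false := by
          rcases h : PySem.Set.contains K x with _ | _
          · rfl
          · exact absurd ((hciff x).1 h) hxK
        simp [hxK, hx]
  · have hnone : ∀ y ∈ g, y ∉ K := by
      intro y hy hyK
      exact hany (List.any_eq_true.2 ⟨y, hy, (hciff y).2 hyK⟩)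
    have hinter : (PySem.Set.inter g K).isEmpty = true := by
      rw [List.isEmpty_iff, List.eq_nil_iff_forall_not_mem]
      intro y hy
      obtain ⟨hyg, hyK⟩ := (PySem.Set.mem_inter g K y).1 hy
      exact hnone y hyg hyK
    rw [Bool.not_eq_true] at hany
    rw [hany]
    simp only [Bool.false_eq_true, if_false]
    by_cases h1 : (PySem.Set.len g == 1) = true
    · have hlen : g.length = 1 := by
        have h2 := beq_iff_eq.1 h1
        simp only [PySem.Set.len] at h2
        exact_mod_cast h2
      rw [if_pos h1]
      simp [hlen]
    · have hlen : g.length ≠ 1 := by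
        intro h
        exact h1 (by simp [PySem.Set.len, h])
      have hgt : 1 < g.length := by
        have := List.length_pos_of_mem hx
        omega
      rw [if_neg h1, hinter]
      rw [if_neg (show ¬ ((!true) = true) by decide)]
      rw [PySem.List.slice_to_neg_one]
      rw [pv_mem_dropLast_sorted g hg x hx]
      simp [hgt]

theorem pv_contrib_subset (K : PySem.Set String) (g : PySem.Set String) (x : String)
    (hx : x ∈ pvContrib K g) : x ∈ g := by
  unfold pvContrib at hx
  split_ifs at hx with h1 h2
  · exact absurd hx (List.not_mem_nil)
  · exact ((PySem.Set.mem_diff g K x).1 hx).1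
  · rw [PySem.List.slice_to_neg_one] at hx
    exact (PySem.List.mem_sorted g (fun x => x) false x).1 (List.mem_of_mem_dropLast hx)

-- the two pre-sort result lists have the same members
theorem pv_foldA (K : PySem.Set String) :
    (fun (res : PySem.Set String) (dists : PySem.Set String) =>
      if PySem.Set.len dists == 1 then res
      else if !(PySem.Set.inter dists K).isEmpty then PySem.Set.update res (PySem.Set.diff dists K)
      else PySem.Set.update res (PySem.List.slice (PySem.List.sorted dists (fun x => x) false) none (some (-1))))
    = (fun r g => PySem.Set.update r (pvContrib K g)) := by
  funext r g
  unfold pvContrib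
  split_ifs with h1 h2 <;> rfl

-- the whole equivalence, with the name function abstract (nothing concrete to unfold)
theorem pv_abstract (nd : String → String) (l kd : List String) :
    PySem.List.sorted
      ((PySem.Dict.values (l.foldl
          (fun d dist => d.modify (nd dist) PySem.Set.empty (fun s => PySem.Set.add s dist)) PySem.Dict.empty)).foldl
        (fun r g => PySem.Set.update r (pvContrib (PySem.Set.ofList kd) g)) PySem.Set.empty) (fun x => x) false
    = PySem.List.sorted ((PySem.List.dedup l).filter (fun d =>
        if ((PySem.List.dedup l).filter (fun e => nd e == nd d)).any (fun e => PySem.Set.contains (PySem.Set.ofList kd) e)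
        then !(PySem.Set.contains (PySem.Set.ofList kd) d)
        else decide (1 < ((PySem.List.dedup l).filter (fun e => nd e == nd d)).length) &&
          !(((PySem.List.max? ((PySem.List.dedup l).filter (fun e => nd e == nd d)) (fun x => x)).getD "") == d)))
      (fun x => x) false := by
  set K : PySem.Set String := PySem.Set.ofList kd with hK
  set ldists : PySem.Dict String (PySem.Set String) :=
    l.foldl (fun d dist => d.modify (nd dist) PySem.Set.empty (fun s => PySem.Set.add s dist)) PySem.Dict.empty with hld
  have hkeys : ldists.keys = PySem.Set.ofList (l.map nd) := by
    rw [hld, PySem.Dict.keys_foldl_modify_key]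
    simp [PySem.Set.update_nil_left]
  have hndk : ldists.keys.Nodup := by
    rw [hkeys]
    exact PySem.Set.nodup_ofList (l.map nd)
  have hgetD : ∀ n, ldists.getD n PySem.Set.empty = PySem.Set.ofList (l.filter (fun x => nd x == n)) := by
    intro n
    rw [hld, pv_groupDict_getD]
    simp [PySem.Set.update_nil_left]
  have hvals : ldists.values = ldists.keys.map (fun n => PySem.Set.ofList (l.filter (fun x => nd x == n))) := by
    rw [PySem.Dict.values_eq_map_keys ldists hndk PySem.Set.empty]
    exact List.map_congr_left (fun n _ => hgetD n)
  set O := PySem.List.dedup l with hO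
  have hOof : O = PySem.Set.ofList l := by rw [hO]; simp
  have hgroup : ∀ d : String, O.filter (fun e => nd e == nd d)
      = PySem.Set.ofList (l.filter (fun x => nd x == nd d)) := by
    intro d
    rw [hOof, pv_ofList_filter]
  set removed := fun (d : String) =>
    if (O.filter (fun e => nd e == nd d)).any (fun e => PySem.Set.contains K e) then !(PySem.Set.contains K d)
    else decide (1 < (O.filter (fun e => nd e == nd d)).length) &&
      !(((PySem.List.max? (O.filter (fun e => nd e == nd d)) (fun x => x)).getD "") == d) with hrem
  have hremoved : ∀ d, removed d = pvRemoved K (PySem.Set.ofList (l.filter (fun x => nd x == nd d))) d := by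
    intro d
    rw [hrem]
    simp only [hgroup d]
    rfl
  have hmem : ∀ y, y ∈ (PySem.Dict.values ldists).foldl (fun r g => PySem.Set.update r (pvContrib K g)) PySem.Set.empty
      ↔ y ∈ O.filter removed := by
    intro y
    rw [pv_mem_foldl_update, List.mem_filter, hvals]
    simp only [List.mem_map]
    constructor
    · rintro (h | ⟨g, ⟨n, hn, rfl⟩, hy⟩)
      · exact absurd h (List.not_mem_nil)
      · have hyg := pv_contrib_subset K _ y hy
        have hyl' := (PySem.Set.mem_ofList _ y).1 hyg
        have hyl : y ∈ l := (List.mem_filter.1 hyl').1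
        have hny : n = nd y := (beq_iff_eq.1 (List.mem_filter.1 hyl').2).symm
        subst hny
        refine ⟨by rw [hOof]; exact (PySem.Set.mem_ofList l y).2 hyl, ?_⟩
        rw [hremoved y, ← pv_pergroup K _ y (PySem.Set.nodup_ofList _) hyg]
        exact hy
    · rintro ⟨hyO, hyr⟩
      have hyl : y ∈ l := (PySem.Set.mem_ofList l y).1 (hOof ▸ hyO)
      refine Or.inr ⟨_, ⟨nd y, ?_, rfl⟩, ?_⟩
      · rw [hkeys]
        exact (PySem.Set.mem_ofList _ _).2 (List.mem_map.2 ⟨y, hyl, rfl⟩)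
      · have hyg : y ∈ PySem.Set.ofList (l.filter (fun x => nd x == nd y)) :=
          (PySem.Set.mem_ofList _ y).2 (List.mem_filter.2 ⟨hyl, by simp⟩)
        rw [pv_pergroup K _ y (PySem.Set.nodup_ofList _) hyg]
        rw [hremoved y] at hyr
        exact hyr
  have hndA : ((PySem.Dict.values ldists).foldl (fun r g => PySem.Set.update r (pvContrib K g)) PySem.Set.empty).Nodup :=
    pv_nodup_foldl_update _ _ _ List.nodup_nil
  have hndB : (O.filter removed).Nodup := by
    have hOnd : O.Nodup := by
      rw [hOof]
      exact PySem.Set.nodup_ofList l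
    exact hOnd.filter _
  have hperm := (List.perm_ext_iff_of_nodup hndA hndB).2 hmem
  exact PySem.List.sorted_eq_sorted_of_perm _ _ _ (fun a b h => h) hperm

theorem pv_core (l : List String) (kd : List String) :
    duplicates_to_remove l kd = duplicates_to_remove_alt l kd := by
  show PySem.List.sorted
      ((PySem.Dict.values (l.foldl
          (fun d dist => d.modify (name_dist dist) PySem.Set.empty (fun s => PySem.Set.add s dist)) PySem.Dict.empty)).foldl
        (fun res dists =>
          if PySem.Set.len dists == 1 then res
          else if !(PySem.Set.inter dists (PySem.Set.ofList kd)).isEmpty then PySem.Set.update res (PySem.Set.diff dists (PySem.Set.ofList kd))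
          else PySem.Set.update res (PySem.List.slice (PySem.List.sorted dists (fun x => x) false) none (some (-1))))
        PySem.Set.empty) (fun x => x) false
    = PySem.List.sorted ((PySem.List.dedup l).filter (fun d =>
        if ((PySem.List.dedup l).filter (fun e => name_dist e == name_dist d)).any (fun e => PySem.Set.contains (PySem.Set.ofList kd) e)
        then !(PySem.Set.contains (PySem.Set.ofList kd) d)
        else decide (1 < ((PySem.List.dedup l).filter (fun e => name_dist e == name_dist d)).length) &&
          !(((PySem.List.max? ((PySem.List.dedup l).filter (fun e => name_dist e == name_dist d)) (fun x => x)).getD "") == d)))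
      (fun x => x) false
  rw [pv_foldA (PySem.Set.ofList kd)]
  exact pv_abstract name_dist l kd

-- ===== VERDICT (by name: the statement is the Claim_ definition above) =====
theorem duplicates_to_remove_spec : Claim_equal_duplicates_to_remove := by
  intro l kd _
  exact pv_core l kd
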